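-- pv_equiv track=rewrite | github.com/sintel-it/meta90_app | app.py | _modulo_from_endpoint
-- ===== SOURCE A (Python) =====
-- def _modulo_from_endpoint(endpoint):
--     ep = (endpoint or "").strip()
--     mapping = {
--         "metas_bp.": "metas",
--         "calendario_bp.": "calendario",
--         "mensajes_bp.": "mensajes",
--         "notificaciones_bp.": "notificaciones",
--         "perfil_bp.": "perfil",
--     }
--     for prefix, modulo in mapping.items():
--         if ep.startswith(prefix):
--             return modulo
--     return None
-- ===== SOURCE B (Python) =====
-- def _modulo_from_endpoint(endpoint):
--     ep = (endpoint or "").strip()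
--     mapping = {
--         "metas_bp.": "metas",
--         "calendario_bp.": "calendario",
--         "mensajes_bp.": "mensajes",
--         "notificaciones_bp.": "notificaciones",
--         "perfil_bp.": "perfil",
--     }
--     key = ep[:ep.index(".") + 1] if "." in ep else ep
--     return mapping.get(key)
-- ===== Notes on version B (the rewrite author's own statement) =====
-- stated objective: simpler
-- what changed: Replaces the loop of startswith prefix tests with a single exact dict lookup on the key normalized to the substring up to and including the first dot.
import Mathlib
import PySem

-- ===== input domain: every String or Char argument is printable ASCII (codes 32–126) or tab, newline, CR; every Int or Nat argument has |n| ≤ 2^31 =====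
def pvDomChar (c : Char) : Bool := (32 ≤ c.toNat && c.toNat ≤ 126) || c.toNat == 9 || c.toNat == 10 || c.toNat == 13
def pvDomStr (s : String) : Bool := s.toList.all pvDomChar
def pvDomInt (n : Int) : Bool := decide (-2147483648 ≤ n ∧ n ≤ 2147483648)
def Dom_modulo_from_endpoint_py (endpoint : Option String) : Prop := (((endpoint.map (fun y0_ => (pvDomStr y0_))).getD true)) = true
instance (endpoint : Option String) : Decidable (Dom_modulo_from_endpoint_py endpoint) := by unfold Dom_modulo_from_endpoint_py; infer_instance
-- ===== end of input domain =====

-- B replaces A's loop of startswith prefix tests by one exact dict lookup on the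
-- key normalized to the substring up to and including the first dot (simpler).

-- ===== PORT A =====
def modulo_from_endpoint_py (endpoint : Option String) : Option String :=
  let ep := PySem.Str.strip (endpoint.getD "")
  if PySem.Str.startswith ep "metas_bp." then some "metas"
  else if PySem.Str.startswith ep "calendario_bp." then some "calendario"
  else if PySem.Str.startswith ep "mensajes_bp." then some "mensajes"
  else if PySem.Str.startswith ep "notificaciones_bp." then some "notificaciones"
  else if PySem.Str.startswith ep "perfil_bp." then some "perfil"
  else none

-- ===== PORT B =====
def modulo_from_endpoint_py_alt (endpoint : Option String) : Option String :=
  let ep := PySem.Str.strip (endpoint.getD "")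
  let mapping : PySem.Dict String String := PySem.Dict.ofList
    [("metas_bp.", "metas"), ("calendario_bp.", "calendario"),
     ("mensajes_bp.", "mensajes"), ("notificaciones_bp.", "notificaciones"),
     ("perfil_bp.", "perfil")]
  let key := if PySem.Str.isIn "." ep then
      PySem.Str.slice ep none (some (PySem.Str.find ep "." + 1))
    else ep
  mapping.get? key

-- ===== PRECONDITION & SPEC =====
def Spec_modulo_from_endpoint_py (endpoint : Option String) (out : Option String) : Prop := out = modulo_from_endpoint_py_alt endpoint
instance (endpoint : Option String) (out : Option String) : Decidable (Spec_modulo_from_endpoint_py endpoint out) := by unfold Spec_modulo_from_endpoint_py; infer_instance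

-- ===== CLAIM (what is proved, stated in full; the proofs are below) =====
def Claim_equal_modulo_from_endpoint_py : Prop := ∀ (endpoint : Option String), Dom_modulo_from_endpoint_py endpoint → Spec_modulo_from_endpoint_py endpoint (modulo_from_endpoint_py endpoint)

-- ===== LEMMAS AND PROOFS =====

-- the List Char key B computes: up to and including the first '.', or the whole list
def keyC (l : List Char) : List Char :=
  if PySem.Chars.isIn ['.'] l then l.take ((PySem.Chars.find l ['.']).toNat + 1) else l

lemma singleton_prefix_iff (a : Char) (m : List Char) : [a] <+: m ↔ m[0]? = some a := by
  cases m with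
  | nil => simp
  | cons x xs =>
    constructor
    · rintro ⟨t, ht⟩; cases ht; simp
    · intro h; simp at h; subst h; exact ⟨xs, rfl⟩

lemma keyC_of_decomp (w t : List Char) (hw : '.' ∉ w) :
    keyC (w ++ '.' :: t) = w ++ ['.'] := by
  have hinf : ['.'] <:+: (w ++ '.' :: t) := ⟨w, t, by simp⟩
  have hin : PySem.Chars.isIn ['.'] (w ++ '.' :: t) = true :=
    (PySem.Chars.isIn_iff_infix _ _).mpr hinf
  have hnn : 0 ≤ PySem.Chars.find (w ++ '.' :: t) ['.'] :=
    (PySem.Chars.find_nonneg_iff _ _).mpr hinf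
  obtain ⟨hpre, hmin⟩ := PySem.Chars.find_spec (s := w ++ '.' :: t) (sub := ['.']) hnn
  set k := (PySem.Chars.find (w ++ '.' :: t) ['.']).toNat with hk
  have hkw : k = w.length := by
    rcases lt_trichotomy k w.length with h | h | h
    · exfalso
      have : (w ++ '.' :: t)[k]? = some '.' := by
        have := (singleton_prefix_iff '.' ((w ++ '.' :: t).drop k)).mp hpre
        simpa using this
      have hg : (w ++ '.' :: t)[k]? = w[k]? := by
        rw [List.getElem?_append_left h]
      rw [hg] at this
      exact hw (List.mem_of_getElem? this)
    · exact h
    · exfalso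
      apply hmin w.length h
      rw [singleton_prefix_iff]
      simp
  unfold keyC
  rw [if_pos hin, ← hk, hkw]
  simp [List.take_append]

lemma sw_eq_beq (l w : List Char) (hw : '.' ∉ w) :
    PySem.Chars.startswith l (w ++ ['.']) = (w ++ ['.'] == keyC l) := by
  by_cases h : (w ++ ['.']) <+: l
  · obtain ⟨t, ht⟩ := h
    subst ht
    have h1 : PySem.Chars.startswith (w ++ ['.'] ++ t) (w ++ ['.']) = true :=
      (PySem.Chars.startswith_iff _ _).mpr ⟨t, rfl⟩
    have h2 : keyC (w ++ ['.'] ++ t) = w ++ ['.'] := by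
      simpa using keyC_of_decomp w t hw
    rw [h1, h2]
    simp
  · have h1 : PySem.Chars.startswith l (w ++ ['.']) = false := by
      rcases hb : PySem.Chars.startswith l (w ++ ['.']) with _ | _
      · rfl
      · exact absurd ((PySem.Chars.startswith_iff _ _).mp hb) h
    rw [h1]
    symm
    rw [beq_eq_false_iff_ne]
    intro he
    apply h
    unfold keyC at he
    by_cases hin : PySem.Chars.isIn ['.'] l
    · rw [if_pos hin] at he
      rw [he]
      exact List.take_prefix _ _
    · rw [if_neg hin] at he
      exact ⟨[], by simp [← he]⟩

-- string-level: B's key computes keyC of the char list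
lemma keyS (ep : String) :
    (if PySem.Str.isIn "." ep then
        PySem.Str.slice ep none (some (PySem.Str.find ep "." + 1))
      else ep).toList = keyC ep.toList := by
  unfold keyC
  by_cases hin : PySem.Chars.isIn ['.'] ep.toList
  · have hin' : PySem.Str.isIn "." ep = true := by
      simpa [PySem.Str.isIn] using hin
    have hnn : 0 ≤ PySem.Chars.find ep.toList ['.'] :=
      (PySem.Chars.find_nonneg_iff _ _).mpr ((PySem.Chars.isIn_iff_infix _ _).mp hin)
    rw [if_pos hin', if_pos hin]
    have hf : PySem.Str.find ep "." = PySem.Chars.find ep.toList ['.'] := by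
      simp [PySem.Str.find]
    rw [PySem.Str.toList_slice, hf, PySem.Chars.slice_eq_listSlice,
        PySem.List.slice_to _ (by omega)]
    congr 1
    omega
  · have hin0 : PySem.Chars.isIn ['.'] ep.toList = false := Bool.eq_false_iff.mpr hin
    have hin' : PySem.Str.isIn "." ep = false := by
      simpa [PySem.Str.isIn] using hin0
    rw [if_neg (by simpa using hin0), if_neg hin]

lemma beq_str_toList (p q : String) : (p == q) = (p.toList == q.toList) := by
  rw [Bool.eq_iff_iff]
  simp [String.toList_inj]

lemma body_eq (ep : String) :
    (if PySem.Str.startswith ep "metas_bp." then some "metas"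
     else if PySem.Str.startswith ep "calendario_bp." then some "calendario"
     else if PySem.Str.startswith ep "mensajes_bp." then some "mensajes"
     else if PySem.Str.startswith ep "notificaciones_bp." then some "notificaciones"
     else if PySem.Str.startswith ep "perfil_bp." then some "perfil"
     else none) =
    (PySem.Dict.ofList
      [("metas_bp.", "metas"), ("calendario_bp.", "calendario"),
       ("mensajes_bp.", "mensajes"), ("notificaciones_bp.", "notificaciones"),
       ("perfil_bp.", "perfil")] : PySem.Dict String String).get?
      (if PySem.Str.isIn "." ep then
        PySem.Str.slice ep none (some (PySem.Str.find ep "." + 1))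
      else ep) := by
  have hmap : (PySem.Dict.ofList
      [("metas_bp.", "metas"), ("calendario_bp.", "calendario"),
       ("mensajes_bp.", "mensajes"), ("notificaciones_bp.", "notificaciones"),
       ("perfil_bp.", "perfil")] : PySem.Dict String String) =
      PySem.Dict.mk
      [("metas_bp.", "metas"), ("calendario_bp.", "calendario"),
       ("mensajes_bp.", "mensajes"), ("notificaciones_bp.", "notificaciones"),
       ("perfil_bp.", "perfil")] := by decide
  rw [hmap]
  set key := (if PySem.Str.isIn "." ep then
        PySem.Str.slice ep none (some (PySem.Str.find ep "." + 1))
      else ep) with hkey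
  have hkc : key.toList = keyC ep.toList := keyS ep
  have hsw : ∀ (p : String) (w : List Char), p.toList = w ++ ['.'] → '.' ∉ w →
      PySem.Str.startswith ep p = (p == key) := by
    intro p w hp hw
    rw [beq_str_toList, hp, hkc]
    have := sw_eq_beq ep.toList w hw
    rw [PySem.Str.startswith_eq, hp]
    exact this
  rw [hsw "metas_bp." ("metas_bp".toList) (by decide) (by decide),
      hsw "calendario_bp." ("calendario_bp".toList) (by decide) (by decide),
      hsw "mensajes_bp." ("mensajes_bp".toList) (by decide) (by decide),
      hsw "notificaciones_bp." ("notificaciones_bp".toList) (by decide) (by decide),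
      hsw "perfil_bp." ("perfil_bp".toList) (by decide) (by decide)]
  simp only [PySem.Dict.get?_mk_cons]
  have hnone : (PySem.Dict.mk ([] : List (String × String))).get? key = none := by
    simp [PySem.Dict.get?]
  rw [hnone]

-- ===== VERDICT (by name: the statement is the Claim_ definition above) =====
theorem modulo_from_endpoint_py_spec : Claim_equal_modulo_from_endpoint_py := by
  intro endpoint _
  unfold Spec_modulo_from_endpoint_py modulo_from_endpoint_py modulo_from_endpoint_py_alt
  exact body_eq _
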